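-- pv_equiv track=rewrite | github.com/drblez/luaz | scripts/asmfmt.py | _split_operands_remark
-- ===== SOURCE A (Python) =====
-- from typing import Iterable, List, Tuple
--
-- def _split_operands_remark(text: str) -> Tuple[str, str]:
--     """
--     Split operands and trailing remark using spaces outside quoted strings.
--     """
--     if not text:
--         return "", ""
--     in_quote = False
--     i = 0
--     while i < len(text) - 1:
--         ch = text[i]
--         if ch == "'":
--             if in_quote and i + 1 < len(text) and text[i + 1] == "'":
--                 i += 2
--                 continue
--             in_quote = not in_quote
--             i += 1
--             continue
--         if not in_quote and text[i] == " ":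
--             j = i
--             while j < len(text) and text[j] == " ":
--                 j += 1
--             next_idx = j if j < len(text) else -1
--             prev_idx = i - 1
--             while prev_idx >= 0 and text[prev_idx] == " ":
--                 prev_idx -= 1
--             if next_idx == -1:
--                 break
--             if j - i >= 2:
--                 return text[:i].rstrip(), text[j:].rstrip()
--             prev_char = text[prev_idx] if prev_idx >= 0 else ""
--             next_char = text[next_idx]
--             if prev_char != "," and next_char != ",":
--                 return text[:i].rstrip(), text[j:].rstrip()
--             i = j
--             continue
--         i += 1
--     return text.rstrip(), ""
-- ===== SOURCE B (Python) =====
-- from typing import Tuple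
--
-- def _split_operands_remark(text: str) -> Tuple[str, str]:
--     """
--     Split operands and trailing remark using spaces outside quoted strings.
--     Two-pass version: precompute a quote mask, then scan for the split space.
--     """
--     n = len(text)
--     if n == 0:
--         return "", ""
--     # pass 1: inside[k] = True iff index k lies inside a quoted region
--     inside = [False] * n
--     q = False
--     k = 0
--     while k < n:
--         c = text[k]
--         if c == "'":
--             if q and k + 1 < n and text[k + 1] == "'":
--                 inside[k] = q
--                 inside[k + 1] = q
--                 k += 2
--                 continue
--             inside[k] = q
--             q = not q
--             k += 1
--             continue
--         inside[k] = q
--         k += 1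
--     # pass 2: first space outside quotes decides the split
--     for i in range(n - 1):
--         if text[i] == " " and not inside[i]:
--             j = i
--             while j < n and text[j] == " ":
--                 j += 1
--             if j == n:
--                 break
--             if j - i >= 2:
--                 return text[:i].rstrip(), text[j:].rstrip()
--             p = i - 1
--             while p >= 0 and text[p] == " ":
--                 p -= 1
--             prev_char = text[p] if p >= 0 else ""
--             if prev_char != "," and text[j] != ",":
--                 return text[:i].rstrip(), text[j:].rstrip()
--     return text.rstrip(), ""
-- ===== Notes on version B (the rewrite author's own statement) =====
-- stated objective: alternative
-- what changed: Replaces A's single stateful while-loop with manual index jumps by two passes: a prepass builds a boolean in-quote mask for every index, then a stateless linear scan over that mask finds the first splitting space.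
import Mathlib
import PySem

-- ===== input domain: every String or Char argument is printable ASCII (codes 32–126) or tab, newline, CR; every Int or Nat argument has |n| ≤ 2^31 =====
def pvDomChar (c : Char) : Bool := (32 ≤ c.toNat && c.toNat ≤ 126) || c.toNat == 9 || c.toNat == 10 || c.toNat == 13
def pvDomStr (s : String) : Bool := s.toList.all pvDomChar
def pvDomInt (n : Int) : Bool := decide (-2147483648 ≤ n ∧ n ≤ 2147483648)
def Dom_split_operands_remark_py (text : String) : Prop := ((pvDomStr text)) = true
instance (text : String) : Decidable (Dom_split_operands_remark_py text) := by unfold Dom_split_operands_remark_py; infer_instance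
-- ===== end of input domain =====

-- B replaces A's single stateful scan with a quote-mask prepass plus a stateless
-- linear scan: a genuinely different decomposition of the same O(n) task (objective: alternative).

-- ===== PORT A =====
-- shared inner `while` loop of both Pythons:
-- `j = i; while j < len(text) and text[j] == ' ': j += 1`  (result = the final j)
def pvRunEnd (cs : List Char) (j : Nat) : Nat :=
  if _h : j < cs.length then
    if cs.getD j 'x' = ' ' then pvRunEnd cs (j + 1) else j
  else j
termination_by cs.length - j
decreasing_by exact Nat.sub_succ_lt_self _ _ _h

-- used by `pvLoopA` for termination: the run end is strictly past a space at i < len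
theorem pvRunEnd_ge (cs : List Char) (j : Nat) : j ≤ pvRunEnd cs j := by
  unfold pvRunEnd
  split_ifs with h1 h2
  · have := pvRunEnd_ge cs (j + 1); omega
  · omega
  · omega
termination_by cs.length - j
decreasing_by omega

theorem pvRunEnd_gt (cs : List Char) (j : Nat) (h : j < cs.length)
    (hs : cs.getD j 'x' = ' ') : j < pvRunEnd cs j := by
  unfold pvRunEnd
  rw [dif_pos h, if_pos hs]
  have := pvRunEnd_ge cs (j + 1); omega

-- shared inner backward `while` loop of both Pythons:
-- `p = i - 1; while p >= 0 and text[p] == ' ': p -= 1`;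
-- result: `none` = p went below 0 (Python prev_char = ""), else `some text[p]`
def pvPrevChar (cs : List Char) (i : Nat) : Option Char :=
  match i with
  | 0 => none
  | p + 1 => if cs.getD p 'x' = ' ' then pvPrevChar cs p else some (cs.getD p 'x')

-- A's while-loop: state = (in_quote, i); `i < len(text) - 1` is `i + 1 < cs.length`;
-- `pvRunEnd cs i` is A's local j; the `break` returns the loop's final
-- `text.rstrip(), ""` directly.
def pvLoopA (cs : List Char) (q : Bool) (i : Nat) : String × String :=
  if hg : i + 1 < cs.length then
    if cs.getD i 'x' = '\'' then
      if q = true ∧ i + 1 < cs.length ∧ cs.getD (i + 1) 'x' = '\'' then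
        pvLoopA cs q (i + 2)
      else
        pvLoopA cs (!q) (i + 1)
    else if hsp : q = false ∧ cs.getD i 'x' = ' ' then
      if pvRunEnd cs i = cs.length then
        (String.ofList (PySem.Chars.rstrip cs), "")
      else if 2 ≤ pvRunEnd cs i - i then
        (String.ofList (PySem.Chars.rstrip (cs.take i)),
         String.ofList (PySem.Chars.rstrip (cs.drop (pvRunEnd cs i))))
      else if pvPrevChar cs i ≠ some ',' ∧ cs.getD (pvRunEnd cs i) 'x' ≠ ',' then
        (String.ofList (PySem.Chars.rstrip (cs.take i)),
         String.ofList (PySem.Chars.rstrip (cs.drop (pvRunEnd cs i))))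
      else
        pvLoopA cs q (pvRunEnd cs i)
    else
      pvLoopA cs q (i + 1)
  else (String.ofList (PySem.Chars.rstrip cs), "")
termination_by cs.length - i
decreasing_by
  · exact Nat.sub_lt_sub_left (Nat.lt_of_succ_lt hg) (Nat.lt_succ_of_lt (Nat.lt_succ_self i))
  · exact Nat.sub_succ_lt_self _ _ (Nat.lt_of_succ_lt hg)
  · exact Nat.sub_lt_sub_left (Nat.lt_of_succ_lt hg)
      (pvRunEnd_gt cs i (Nat.lt_of_succ_lt hg) hsp.2)
  · exact Nat.sub_succ_lt_self _ _ (Nat.lt_of_succ_lt hg)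

def split_operands_remark_py (text : String) : String × String :=
  if text.toList = [] then ("", "")
  else pvLoopA text.toList false 0

-- ===== PORT B =====
-- pass 1 of Source B: inside[k] = in-quote state when index k is reached (built left to right)
def pvMask (cs : List Char) (q : Bool) (k : Nat) : List Bool :=
  if _h : k < cs.length then
    if cs.getD k 'x' = '\'' then
      if q = true ∧ k + 1 < cs.length ∧ cs.getD (k + 1) 'x' = '\'' then
        q :: q :: pvMask cs q (k + 2)
      else
        q :: pvMask cs (!q) (k + 1)
    else q :: pvMask cs q (k + 1)
  else []
termination_by cs.length - k
decreasing_by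
  · exact Nat.sub_lt_sub_left _h (Nat.lt_succ_of_lt (Nat.lt_succ_self k))
  · exact Nat.sub_succ_lt_self _ _ _h
  · exact Nat.sub_succ_lt_self _ _ _h

-- pass 2 of Source B: `for i in range(n - 1)` over the fixed mask; the `break`
-- returns the final `text.rstrip(), ""` directly.
def pvPass2 (cs : List Char) (M : List Bool) (i : Nat) : String × String :=
  if hg : i + 1 < cs.length then
    if cs.getD i 'x' = ' ' ∧ M.getD i false = false then
      if pvRunEnd cs i = cs.length then
        (String.ofList (PySem.Chars.rstrip cs), "")
      else if 2 ≤ pvRunEnd cs i - i then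
        (String.ofList (PySem.Chars.rstrip (cs.take i)),
         String.ofList (PySem.Chars.rstrip (cs.drop (pvRunEnd cs i))))
      else if pvPrevChar cs i ≠ some ',' ∧ cs.getD (pvRunEnd cs i) 'x' ≠ ',' then
        (String.ofList (PySem.Chars.rstrip (cs.take i)),
         String.ofList (PySem.Chars.rstrip (cs.drop (pvRunEnd cs i))))
      else
        pvPass2 cs M (i + 1)
    else
      pvPass2 cs M (i + 1)
  else (String.ofList (PySem.Chars.rstrip cs), "")
termination_by cs.length - i
decreasing_by
  · exact Nat.sub_succ_lt_self _ _ (Nat.lt_of_succ_lt hg)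
  · exact Nat.sub_succ_lt_self _ _ (Nat.lt_of_succ_lt hg)

def split_operands_remark_py_alt (text : String) : String × String :=
  if text.toList = [] then ("", "")
  else pvPass2 text.toList (pvMask text.toList false 0) 0

-- ===== PRECONDITION & SPEC =====
def Spec_split_operands_remark_py (text : String) (out : String × String) : Prop := out = split_operands_remark_py_alt text
instance (text : String) (out : String × String) : Decidable (Spec_split_operands_remark_py text out) := by unfold Spec_split_operands_remark_py; infer_instance

-- ===== CLAIM (what is proved, stated in full; the proofs are below) =====
def Claim_equal_split_operands_remark_py : Prop := ∀ (text : String), Dom_split_operands_remark_py text → Spec_split_operands_remark_py text (split_operands_remark_py text)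

-- ===== LEMMAS AND PROOFS =====

-- "M records, from position k on, the in-quote evolution started in state q at k"
def pvMatches (cs : List Char) (M : List Bool) (q : Bool) (k : Nat) : Prop :=
  if _h : k < cs.length then
    if cs.getD k 'x' = '\'' then
      if q = true ∧ k + 1 < cs.length ∧ cs.getD (k + 1) 'x' = '\'' then
        M.getD k false = q ∧ M.getD (k + 1) false = q ∧ pvMatches cs M q (k + 2)
      else
        M.getD k false = q ∧ pvMatches cs M (!q) (k + 1)
    else M.getD k false = q ∧ pvMatches cs M q (k + 1)
  else True
termination_by cs.length - k
decreasing_by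
  · exact Nat.sub_lt_sub_left _h (Nat.lt_succ_of_lt (Nat.lt_succ_self k))
  · exact Nat.sub_succ_lt_self _ _ _h
  · exact Nat.sub_succ_lt_self _ _ _h

theorem getD_append_self {α : Type} (acc : List α) (a : α) (l : List α) (d : α) :
    (acc ++ a :: l).getD acc.length d = a := by
  simp [List.getD]

theorem getD_append_succ {α : Type} (acc : List α) (a b : α) (l : List α) (d : α) :
    (acc ++ a :: b :: l).getD (acc.length + 1) d = b := by
  simp [List.getD]

theorem pvMask_matches (cs : List Char) (q : Bool) (k : Nat) (acc : List Bool)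
    (h : acc.length = k) : pvMatches cs (acc ++ pvMask cs q k) q k := by
  rw [pvMatches, pvMask]
  split_ifs with h1 h2 h3
  · -- escaped-quote pair
    refine ⟨h ▸ getD_append_self acc q _ false, h ▸ getD_append_succ acc q q _ false, ?_⟩
    have := pvMask_matches cs q (k + 2) (acc ++ [q, q]) (by simp [h])
    simpa using this
  · -- toggle
    refine ⟨h ▸ getD_append_self acc q _ false, ?_⟩
    have := pvMask_matches cs (!q) (k + 1) (acc ++ [q]) (by simp [h])
    simpa using this
  · -- ordinary char
    refine ⟨h ▸ getD_append_self acc q _ false, ?_⟩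
    have := pvMask_matches cs q (k + 1) (acc ++ [q]) (by simp [h])
    simpa using this
termination_by cs.length - k
decreasing_by all_goals omega

-- pass 2 skips an index whose character is not a space, whatever the mask says
theorem pvPass2_step (cs : List Char) (M : List Bool) (i : Nat)
    (h : cs.getD i 'x' ≠ ' ') : pvPass2 cs M i = pvPass2 cs M (i + 1) := by
  by_cases hg : i + 1 < cs.length
  · rw [pvPass2, dif_pos hg, if_neg (fun hc => h hc.1)]
  · conv_lhs => rw [pvPass2, dif_neg hg]
    conv_rhs => rw [pvPass2, dif_neg (show ¬(i + 1 + 1 < cs.length) from by omega)]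

theorem pvLoopA_eq_pass2 (cs : List Char) (M : List Bool) (q : Bool) (i : Nat)
    (h : pvMatches cs M q i) : pvLoopA cs q i = pvPass2 cs M i := by
  by_cases hg : i + 1 < cs.length
  · by_cases hq : cs.getD i 'x' = '\''
    · by_cases hp : q = true ∧ i + 1 < cs.length ∧ cs.getD (i + 1) 'x' = '\''
      · -- escaped pair: A jumps to i+2, pass 2 walks both quote characters
        rw [pvMatches, dif_pos (by omega), if_pos hq, if_pos hp] at h
        rw [pvLoopA, dif_pos hg, if_pos hq, if_pos hp,
            pvLoopA_eq_pass2 cs M q (i + 2) h.2.2,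
            pvPass2_step cs M i (by rw [hq]; decide),
            pvPass2_step cs M (i + 1) (by rw [hp.2.2]; decide)]
      · -- toggle
        rw [pvMatches, dif_pos (by omega), if_pos hq, if_neg hp] at h
        rw [pvLoopA, dif_pos hg, if_pos hq, if_neg hp,
            pvLoopA_eq_pass2 cs M (!q) (i + 1) h.2,
            pvPass2_step cs M i (by rw [hq]; decide)]
    · rw [pvMatches, dif_pos (by omega), if_neg hq] at h
      by_cases hsp : q = false ∧ cs.getD i 'x' = ' '
      · -- space outside quotes: both sides take the same decision on the run
        rw [pvLoopA, dif_pos hg, if_neg hq, dif_pos hsp,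
            pvPass2, dif_pos hg,
            if_pos (show cs.getD i 'x' = ' ' ∧ M.getD i false = false from
              ⟨hsp.2, by rw [h.1, hsp.1]⟩)]
        have hj : i < pvRunEnd cs i := pvRunEnd_gt cs i (by omega) hsp.2
        split_ifs with c1 c2 c3
        · rfl
        · rfl
        · rfl
        · have hji : pvRunEnd cs i = i + 1 := by omega
          rw [hji]
          exact pvLoopA_eq_pass2 cs M q (i + 1) h.2
      · by_cases hsc : cs.getD i 'x' = ' '
        · -- space but in_quote = true: the mask bit is true, pass 2 skips it
          have hqt : q = true := by
            cases q with
            | false => exact absurd ⟨rfl, hsc⟩ hsp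
            | true => rfl
          rw [pvLoopA, dif_pos hg, if_neg hq, dif_neg hsp,
              pvLoopA_eq_pass2 cs M q (i + 1) h.2]
          conv_rhs => rw [pvPass2]
          rw [dif_pos hg, if_neg (by rw [h.1, hqt]; simp)]
        · -- any other character: both step to i+1
          rw [pvLoopA, dif_pos hg, if_neg hq, dif_neg hsp,
              pvLoopA_eq_pass2 cs M q (i + 1) h.2,
              pvPass2_step cs M i hsc]
  · rw [pvLoopA, dif_neg hg, pvPass2, dif_neg hg]
termination_by cs.length - i
decreasing_by all_goals omega

-- ===== VERDICT (by name: the statement is the Claim_ definition above) =====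
theorem split_operands_remark_py_spec : Claim_equal_split_operands_remark_py := by
  intro text _
  unfold Spec_split_operands_remark_py split_operands_remark_py split_operands_remark_py_alt
  by_cases he : text.toList = []
  · simp [he]
  · rw [if_neg he, if_neg he]
    exact pvLoopA_eq_pass2 text.toList (pvMask text.toList false 0) false 0
      (by simpa using pvMask_matches text.toList false 0 [] rfl)
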